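-- pv_equiv track=rewrite | github.com/synnaxlabs/synnax | x/device-scraper/device_scraper/ni/parse_pinout_info.py | find_next_number
-- ===== SOURCE A (Python) =====
-- def find_next_number(s: str, start: int) -> int | None:
--     num = ""
--     for i in range(start, len(s)):
--         if s[i].isdigit():
--             num += s[i]
--         elif len(num) > 0:
--             break
--     if len(num) == 0:
--         return None
--     return int(num)
-- ===== SOURCE B (Python) =====
-- def find_next_number(s, start):
--     chars = [s[i] for i in range(start, len(s))]
--     i = 0
--     while i < len(chars) and not chars[i].isdigit():
--         i += 1
--     j = i
--     while j < len(chars) and chars[j].isdigit():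
--         j += 1
--     return int("".join(chars[i:j])) if j > i else None
-- ===== Notes on version B (the rewrite author's own statement) =====
-- stated objective: alternative
-- what changed: A's single accumulate-and-break loop is replaced by materialising the scanned character sequence once and then running a two-phase scan: skip leading non-digits, then collect the first digit run; Pre_ excludes start < -len(s), where both programs raise IndexError.
import Mathlib
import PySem

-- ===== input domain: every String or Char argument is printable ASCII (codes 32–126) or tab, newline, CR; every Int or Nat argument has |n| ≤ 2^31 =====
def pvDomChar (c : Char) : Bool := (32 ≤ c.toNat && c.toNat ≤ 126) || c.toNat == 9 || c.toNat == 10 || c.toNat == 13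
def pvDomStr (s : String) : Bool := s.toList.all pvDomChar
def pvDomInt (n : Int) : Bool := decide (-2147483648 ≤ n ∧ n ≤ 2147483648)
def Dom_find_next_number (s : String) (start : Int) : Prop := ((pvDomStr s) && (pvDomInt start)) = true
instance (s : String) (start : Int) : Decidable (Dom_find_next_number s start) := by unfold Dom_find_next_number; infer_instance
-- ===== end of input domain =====

-- B materialises the scanned character sequence once and runs a two-phase
-- skip-non-digits / collect-digit-run scan instead of A's accumulate-and-break
-- loop: a different decomposition of the same O(n) task.


-- ===== PORT A =====
-- the for-loop: num accumulates digits, breaks at the first non-digit after a digit;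
-- pyGet? = none is Python's IndexError (only reachable outside Pre_), the loop stops there
def pvALoop (cs : List Char) (idxs : List Int) (num : List Char) : List Char :=
  match idxs with
  | [] => num
  | i :: rest =>
    match PySem.List.pyGet? cs i with
    | none => num
    | some c =>
      if PySem.Chars.isdigit c then pvALoop cs rest (num ++ [c])
      else if 0 < num.length then num
      else pvALoop cs rest num

def find_next_number (s : String) (start : Int) : Option Int :=
  let cs := s.toList
  let num := pvALoop cs (PySem.List.pyRange start (cs.length : Int) 1) []
  if num.length = 0 then none else PySem.Int.ofChars? num

-- ===== PORT B =====
-- first while loop of Source B: advance past leading non-digits (returns the suffix)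
def pvBDrop (t : List Char) : List Char :=
  match t with
  | [] => []
  | c :: r => if PySem.Chars.isdigit c then c :: r else pvBDrop r

-- second while loop of Source B: collect the leading digit run
def pvBTake (t : List Char) : List Char :=
  match t with
  | [] => []
  | c :: r => if PySem.Chars.isdigit c then c :: pvBTake r else []

def find_next_number_alt (s : String) (start : Int) : Option Int :=
  let cs := s.toList
  -- the comprehension [s[i] for i in range(start, len(s))]; indexing is exact
  -- on Pre_ (every visited index is in range, so the default is never used)
  let chars := (PySem.List.pyRange start (cs.length : Int) 1).map
      (fun i => PySem.List.pyGetD cs i ' ')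
  let digits := pvBTake (pvBDrop chars)
  if 0 < digits.length then PySem.Int.ofChars? digits else none

-- ===== PRECONDITION & SPEC =====
-- Pre_ excludes exactly the inputs where both programs raise IndexError:
-- start < -len(s) makes s[start] raise.
def Pre_find_next_number (s : String) (start : Int) : Prop :=
  -(s.toList.length : Int) ≤ start
instance (s : String) (start : Int) : Decidable (Pre_find_next_number s start) := by
  unfold Pre_find_next_number; infer_instance

def pvWitness_find_next_number : String × Int := ("a1", -1)

def Spec_find_next_number (s : String) (start : Int) (out : Option Int) : Prop :=
  out = find_next_number_alt s start
instance (s : String) (start : Int) (out : Option Int) : Decidable (Spec_find_next_number s start out) := by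
  unfold Spec_find_next_number; infer_instance

-- ===== CLAIM (what is proved, stated in full; the proofs are below) =====
def Claim_equal_find_next_number : Prop := ∀ (s : String) (start : Int), Dom_find_next_number s start → Pre_find_next_number s start → Spec_find_next_number s start (find_next_number s start)

-- ===== LEMMAS AND PROOFS =====

-- in-range indexing: pyGet? returns the pyGetD value
theorem pvGet_eq_getD (xs : List Char) (i : Int) (h : PySem.Raise.InRange xs.length i) (d : Char) :
    PySem.List.pyGet? xs i = some (PySem.List.pyGetD xs i d) := by
  obtain ⟨h1, h2⟩ := h
  simp only [PySem.List.pyGet?, PySem.List.pyGetD, PySem.List.pyIdx?]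
  by_cases h0 : 0 ≤ i
  · rw [if_pos h0, if_pos h2]
    simp [List.getElem?_eq_getElem (show i.toNat < xs.length by omega)]
  · rw [if_neg h0, if_pos h1]
    simp [List.getElem?_eq_getElem (show xs.length - (-i).toNat < xs.length by omega)]

-- A's loop over in-range indices is A's loop over the corresponding characters
def pvALoop' (t : List Char) (num : List Char) : List Char :=
  match t with
  | [] => num
  | c :: r =>
    if PySem.Chars.isdigit c then pvALoop' r (num ++ [c])
    else if 0 < num.length then num
    else pvALoop' r num

theorem pvALoop_eq_pure (cs : List Char) :
    ∀ (idxs : List Int) (num : List Char),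
      (∀ i ∈ idxs, PySem.Raise.InRange cs.length i) →
      pvALoop cs idxs num = pvALoop' (idxs.map (fun i => PySem.List.pyGetD cs i ' ')) num := by
  intro idxs
  induction idxs with
  | nil => intro num _; rfl
  | cons i rest ih =>
    intro num h
    have hi := h i (by simp)
    have hrest : ∀ j ∈ rest, PySem.Raise.InRange cs.length j := fun j hj => h j (by simp [hj])
    simp only [pvALoop, pvALoop', List.map_cons, pvGet_eq_getD cs i hi ' ']
    split_ifs with h1 h2
    · exact ih _ hrest
    · rfl
    · exact ih _ hrest

-- once num is nonempty, A's pure loop appends exactly the leading digit run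
theorem pvALoop'_of_ne_nil (t : List Char) :
    ∀ num : List Char, num ≠ [] → pvALoop' t num = num ++ pvBTake t := by
  induction t with
  | nil => intro num _; simp [pvALoop', pvBTake]
  | cons c r ih =>
    intro num hnum
    by_cases h1 : PySem.Chars.isdigit c
    · rw [show pvALoop' (c :: r) num = pvALoop' r (num ++ [c]) from by simp [pvALoop', h1]]
      rw [ih (num ++ [c]) (by simp)]
      simp [pvBTake, h1]
    · have h2 : 0 < num.length := by
        cases num with | nil => exact absurd rfl hnum | cons a l => simp
      simp [pvALoop', pvBTake, h1, h2]

-- A's pure loop from the empty accumulator is B's drop-then-take pipeline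
theorem pvALoop'_eq_take_drop (t : List Char) :
    pvALoop' t [] = pvBTake (pvBDrop t) := by
  induction t with
  | nil => rfl
  | cons c r ih =>
    by_cases h1 : PySem.Chars.isdigit c
    · rw [show pvALoop' (c :: r) [] = pvALoop' r [c] from by simp [pvALoop', h1]]
      rw [pvALoop'_of_ne_nil r [c] (by simp)]
      simp [pvBDrop, pvBTake, h1]
    · rw [show pvALoop' (c :: r) [] = pvALoop' r [] from by simp [pvALoop', h1]]
      rw [show pvBDrop (c :: r) = pvBDrop r from by simp [pvBDrop, h1]]
      exact ih

theorem pvInRange (cs : List Char) (start : Int) (hpre : -(cs.length : Int) ≤ start) :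
    ∀ i ∈ PySem.List.pyRange start (cs.length : Int) 1, PySem.Raise.InRange cs.length i := by
  intro i hi
  rw [PySem.List.mem_pyRange_one] at hi
  exact ⟨by omega, hi.2⟩

-- ===== VERDICT (by name: the statement is the Claim_ definition above) =====
theorem find_next_number_spec : Claim_equal_find_next_number := by
  intro s start _ hpre
  unfold Spec_find_next_number find_next_number find_next_number_alt
  have h1 := pvALoop_eq_pure s.toList (PySem.List.pyRange start (s.toList.length : Int) 1) []
      (pvInRange s.toList start hpre)
  simp only [h1, pvALoop'_eq_take_drop]
  set d := pvBTake (pvBDrop ((PySem.List.pyRange start (s.toList.length : Int) 1).map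
      (fun i => PySem.List.pyGetD s.toList i ' ')))
  by_cases hd : d.length = 0
  · simp [hd]
  · simp [hd, Nat.pos_of_ne_zero hd]
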